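-- pv_equiv track=rewrite | github.com/carolinacorral/nlp | practicas/practica1.py | toke_acentos_numeros
-- ===== SOURCE A (Python) =====
-- def is_symbol(character: str) -> bool:
--     # Verifica si el carácter es un símbolo (no alfabético ni numérico)
--     decimal = ord(character)  # Obtiene el valor ASCII del carácter
--     # Retorna True si el carácter es un símbolo basado en rangos ASCII
--     return (33 <= decimal <= 47) or (58 <= decimal <= 64) or (91 <= decimal <= 96) or (123 <= decimal <= 126)
--
-- def is_number_word(word) -> bool:
--     # Verifica si una palabra está compuesta completamente de números
--     flag = True
--     for char in word:
--         if not is_number_char(ord(char)):  # Si algún carácter no es numérico, cambia el flag a False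
--             flag = False
--     return flag  # Retorna True si todos los caracteres son numéricos
--
-- def is_number_char(ascii) -> bool:
--     # Verifica si un carácter es un número basándose en su valor ASCII
--     return 48 <= ascii <= 57  # Retorna True si el valor ASCII corresponde a un número (0-9)
--
-- def number_remove(word) -> str:
--     # Elimina los números al principio o al final de la palabra, si no está compuesta enteramente por números
--     if not is_number_word(word):
--         if is_number_char(ord(word[-1])):  # Verifica si el último carácter es un número
--             return word[0:-1]  # Si es número, lo elimina
--         elif is_number_char(ord(word[0])):  # Verifica si el primer carácter es un número
--             return word[1:]  # Si es número, lo elimina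
--     return word  # Retorna la palabra original si no hay cambios
--
-- def toke_acentos_numeros(document) -> list:
--     # Tokeniza un documento, considerando símbolos, espacios y números
--     tokens = [None] * len(document)  # Inicializa una lista de tokens con el tamaño del documento
--     i = 0  # Inicializa el índice `i`
--     flag = 0  # Inicializa el marcador de posición `flag`
--
--     # Recorre el documento carácter por carácter
--     for letter in document:
--         if ord(letter) == 32 or is_symbol(letter):  # Si se detecta un espacio o símbolo
--             tokens[i] = document[flag:i]  # Agrega la palabra completa hasta el índice actual
--             flag = i + 1  # Actualiza el marcador `flag` al siguiente índice
--         i += 1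
--
--     # Agrega la última parte del documento a los tokens
--     tokens += [document[flag:i]]
--
--     # Filtra los tokens para eliminar los vacíos o nulos
--     tokens = [x for x in tokens if x is not None and x != '']
--
--     # Remueve números al principio o final de cada token
--     for idx_token in range(len(tokens) - 1):
--         tokens[idx_token] = number_remove(tokens[idx_token])
--
--     # Filtra los tokens nuevamente para eliminar los vacíos o nulos
--     tokens = [x for x in tokens if x is not None and x != '']
--
--     return tokens  # Retorna la lista de tokens procesados
-- ===== SOURCE B (Python) =====
-- def _strip_edge_digit(w: str) -> str:
--     # remove ONE digit from the end (preferred) or start, unless w is all digits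
--     if all('0' <= c <= '9' for c in w):
--         return w
--     if '0' <= w[-1] <= '9':
--         return w[:-1]
--     if '0' <= w[0] <= '9':
--         return w[1:]
--     return w
--
-- def toke_acentos_numeros(document) -> list:
--     # one pass with an accumulator buffer flushed on each separator
--     tokens, buf = [], []
--     for ch in document:
--         o = ord(ch)
--         if o == 32 or 33 <= o <= 47 or 58 <= o <= 64 or 91 <= o <= 96 or 123 <= o <= 126:
--             if buf:
--                 tokens.append(''.join(buf))
--                 buf = []
--         else:
--             buf.append(ch)
--     if buf:
--         tokens.append(''.join(buf))
--     out = []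
--     last = len(tokens) - 1
--     for i, w in enumerate(tokens):
--         if i < last:
--             w = _strip_edge_digit(w)
--         if w:
--             out.append(w)
--     return out
-- ===== Notes on version B (the rewrite author's own statement) =====
-- stated objective: simpler
-- what changed: A pre-allocates a len(document) None-filled list, writes slices at separator indices via an index/flag pair and filters the Nones out, then mutates tokens in place over range(len-1); B tokenizes in one pass with an accumulator buffer flushed on separators (never creating None or empty entries) and applies the edge-digit strip in a single enumerate pass that skips the last token.
import Mathlib
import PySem

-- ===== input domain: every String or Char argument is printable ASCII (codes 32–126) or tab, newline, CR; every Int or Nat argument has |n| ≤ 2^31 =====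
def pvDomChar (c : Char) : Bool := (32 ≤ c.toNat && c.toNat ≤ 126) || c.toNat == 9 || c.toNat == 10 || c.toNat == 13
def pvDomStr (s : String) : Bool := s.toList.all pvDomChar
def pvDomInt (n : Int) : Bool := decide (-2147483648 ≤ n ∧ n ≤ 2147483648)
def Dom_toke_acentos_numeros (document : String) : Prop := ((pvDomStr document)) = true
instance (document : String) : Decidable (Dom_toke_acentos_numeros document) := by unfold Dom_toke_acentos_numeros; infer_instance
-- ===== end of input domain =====

-- B replaces A's size-n None-filled list with index/flag slicing by a single
-- accumulator-buffer pass plus one enumerate pass (objective: simpler).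

-- ===== PORT A =====
def is_symbol (c : Char) : Bool :=
  let d := c.toNat
  decide (33 ≤ d ∧ d ≤ 47) || decide (58 ≤ d ∧ d ≤ 64) || decide (91 ≤ d ∧ d ≤ 96) || decide (123 ≤ d ∧ d ≤ 126)

def is_number_char (a : Nat) : Bool := decide (48 ≤ a ∧ a ≤ 57)

def is_number_word (word : List Char) : Bool :=
  word.foldl (fun flag c => if !(is_number_char c.toNat) then false else flag) true

def number_remove (word : List Char) : List Char :=
  if !(is_number_word word) then
    match PySem.List.pyGet? word (-1) with
    | none => word   -- unreachable: word[-1] raises only on '', which is all-digit for A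
    | some last =>
      if is_number_char last.toNat then PySem.List.slice word (some 0) (some (-1))
      else match PySem.List.pyGet? word 0 with
        | none => word
        | some first =>
          if is_number_char first.toNat then PySem.List.slice word (some 1) none
          else word
  else word

def toke_acentos_numeros (document : String) : List String :=
  let cs := document.toList
  let init : List (Option (List Char)) := List.replicate cs.length none
  let st := cs.foldl
    (fun (st : List (Option (List Char)) × Nat × Nat) letter =>
      if letter.toNat == 32 || is_symbol letter then
        (PySem.List.pySetD st.1 (st.2.1 : Int)
          (some (PySem.List.slice cs (some (st.2.2 : Int)) (some (st.2.1 : Int)))),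
         st.2.1 + 1, st.2.1 + 1)
      else (st.1, st.2.1 + 1, st.2.2))
    (init, 0, 0)
  let tokens1 := st.1 ++ [some (PySem.List.slice cs (some (st.2.2 : Int)) (some (st.2.1 : Int)))]
  let tokens2 := tokens1.filterMap (fun x => match x with
    | none => none
    | some w => if w ≠ [] then some w else none)
  let tokens3 := (PySem.List.pyRange 0 ((tokens2.length : Int) - 1) 1).foldl
    (fun t j => PySem.List.pySetD t j (number_remove (PySem.List.pyGetD t j []))) tokens2
  let tokens4 := tokens3.filter (fun w => decide (w ≠ []))
  tokens4.map (fun w => String.ofList w)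

-- ===== PORT B =====
def sepB (c : Char) : Bool :=
  let o := c.toNat
  decide (o = 32) || decide (33 ≤ o ∧ o ≤ 47) || decide (58 ≤ o ∧ o ≤ 64) || decide (91 ≤ o ∧ o ≤ 96) || decide (123 ≤ o ∧ o ≤ 126)

def isDigitB (c : Char) : Bool := decide ('0' ≤ c ∧ c ≤ '9')

def stripEdgeDigit (w : List Char) : List Char :=
  if w.all isDigitB then w
  else match PySem.List.pyGet? w (-1) with
    | none => w
    | some c =>
      if isDigitB c then PySem.List.slice w none (some (-1))
      else match PySem.List.pyGet? w 0 with
        | none => w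
        | some c0 => if isDigitB c0 then PySem.List.slice w (some 1) none else w

def toke_acentos_numeros_alt (document : String) : List String :=
  let st := document.toList.foldl
    (fun (st : List (List Char) × List Char) ch =>
      if sepB ch then
        (if st.2 ≠ [] then (st.1 ++ [st.2], ([] : List Char)) else st)
      else (st.1, st.2 ++ [ch]))
    ([], [])
  let tokens := if st.2 ≠ [] then st.1 ++ [st.2] else st.1
  let last : Int := (tokens.length : Int) - 1
  let out := (PySem.List.enumerate tokens 0).foldl
    (fun out p =>
      let w := if p.1 < last then stripEdgeDigit p.2 else p.2
      if w ≠ [] then out ++ [w] else out)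
    ([] : List (List Char))
  out.map (fun w => String.ofList w)

-- ===== PRECONDITION & SPEC =====
def Spec_toke_acentos_numeros (document : String) (out : List String) : Prop := out = toke_acentos_numeros_alt document
instance (document : String) (out : List String) : Decidable (Spec_toke_acentos_numeros document out) := by unfold Spec_toke_acentos_numeros; infer_instance

-- ===== CLAIM (what is proved, stated in full; the proofs are below) =====
def Claim_equal_toke_acentos_numeros : Prop := ∀ (document : String), Dom_toke_acentos_numeros document → Spec_toke_acentos_numeros document (toke_acentos_numeros document)

-- ===== LEMMAS AND PROOFS =====

-- reference tokenizer: split on separators, accumulating a buffer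
def splitTok : List Char → List Char → List (List Char)
  | [], buf => if buf ≠ [] then [buf] else []
  | c :: cs, buf =>
    if sepB c then (if buf ≠ [] then buf :: splitTok cs [] else splitTok cs buf)
    else splitTok cs (buf ++ [c])

-- keep the non-None, non-empty entries (A's first comprehension)
def filt (l : List (Option (List Char))) : List (List Char) :=
  l.filterMap (fun x => match x with
    | none => none
    | some w => if w ≠ [] then some w else none)

lemma sep_eq (c : Char) : (c.toNat == 32 || is_symbol c) = sepB c := by
  simp only [is_symbol, sepB, Bool.or_assoc]
  congr 1

lemma filt_append (a b : List (Option (List Char))) : filt (a ++ b) = filt a ++ filt b := by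
  simp [filt]

-- B's final buffer flush
def flushB (st : List (List Char) × List Char) : List (List Char) :=
  if st.2 ≠ [] then st.1 ++ [st.2] else st.1

lemma b_fold_eq (cs : List Char) : ∀ (toks : List (List Char)) (buf : List Char),
    flushB (cs.foldl
      (fun (st : List (List Char) × List Char) ch =>
        if sepB ch then
          (if st.2 ≠ [] then (st.1 ++ [st.2], ([] : List Char)) else st)
        else (st.1, st.2 ++ [ch])) (toks, buf)) = toks ++ splitTok cs buf := by
  induction cs with
  | nil => intro toks buf; by_cases hb : buf = [] <;> simp [flushB, splitTok, hb]
  | cons c cs ih =>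
    intro toks buf
    simp only [List.foldl_cons]
    split
    next hs =>
      split
      next hb =>
        rw [ih]
        simp [splitTok, hs, show buf ≠ [] from hb, List.append_assoc]
      next hb =>
        rw [ih]
        simp [splitTok, hs, show buf = [] from by simpa using hb]
    next hs =>
      rw [ih]
      simp [splitTok, show sepB c = false from by simpa using hs]

lemma a_fold_eq (cs : List Char) : ∀ (ss pre : List Char) (done : List (Option (List Char))) (flag : Nat),
    cs = pre ++ ss → flag ≤ pre.length → done.length = pre.length →
    (let r := ss.foldl
      (fun (st : List (Option (List Char)) × Nat × Nat) letter =>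
        if letter.toNat == 32 || is_symbol letter then
          (PySem.List.pySetD st.1 (st.2.1 : Int)
            (some (PySem.List.slice cs (some (st.2.2 : Int)) (some (st.2.1 : Int)))),
           st.2.1 + 1, st.2.1 + 1)
        else (st.1, st.2.1 + 1, st.2.2))
      (done ++ List.replicate ss.length none, pre.length, flag)
     filt (r.1 ++ [some (PySem.List.slice cs (some (r.2.2 : Int)) (some (r.2.1 : Int)))]))
    = filt done ++ splitTok ss ((cs.drop flag).take (pre.length - flag)) := by
  intro ss
  induction ss with
  | nil =>
    intro pre done flag hcs hflag hdone
    simp only [List.foldl_nil]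
    rw [PySem.List.slice_natCast, filt_append]
    by_cases hb : (cs.drop flag).take (pre.length - flag) = [] <;>
      simp [splitTok, filt, hb]
  | cons c ss ih =>
    intro pre done flag hcs hflag hdone
    have hcs' : cs = (pre ++ [c]) ++ ss := by simpa using hcs
    simp only [List.length_cons, List.replicate_succ, List.foldl_cons]
    by_cases hsep : (c.toNat == 32 || is_symbol c)
    · -- separator step
      simp only [hsep, if_pos]
      have hset : PySem.List.pySetD (done ++ none :: List.replicate ss.length none)
          ((pre.length : Nat) : Int)
          (some (PySem.List.slice cs (some (flag : Int)) (some (pre.length : Int))))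
          = (done ++ [some (PySem.List.slice cs (some (flag : Int)) (some (pre.length : Int)))])
            ++ List.replicate ss.length none := by
        rw [PySem.List.pySetD_natCast, ← hdone]
        simp
      rw [hset]
      have := ih (pre ++ [c])
        (done ++ [some (PySem.List.slice cs (some (flag : Int)) (some (pre.length : Int)))])
        (pre.length + 1) hcs' (by simp) (by simp [hdone])
      simp only [List.length_append, List.length_singleton] at this
      rw [this, filt_append]
      have hbuf : ((cs.drop (pre.length + 1)).take (pre.length + 1 - (pre.length + 1))) = [] := by
        simp
      rw [hbuf, PySem.List.slice_natCast]
      have hs : sepB c = true := by rw [← sep_eq]; exact hsep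
      by_cases hb : (cs.drop flag).take (pre.length - flag) = [] <;>
        simp [splitTok, hs, hb, filt]
    · -- non-separator step
      have hrep : done ++ none :: List.replicate ss.length none
          = (done ++ [none]) ++ List.replicate ss.length none := by simp
      rw [if_neg hsep, hrep]
      have := ih (pre ++ [c]) (done ++ [none]) flag hcs' (by simp; omega) (by simp [hdone])
      simp only [List.length_append, List.length_singleton] at this
      rw [this, filt_append]
      have hdropcs : cs.drop flag = pre.drop flag ++ c :: ss := by
        rw [hcs]; exact List.drop_append_of_le_length hflag
      have hbuf : (cs.drop flag).take (pre.length + 1 - flag)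
          = (cs.drop flag).take (pre.length - flag) ++ [c] := by
        rw [hdropcs]
        have h1 : pre.length + 1 - flag = (pre.drop flag).length + 1 := by simp; omega
        have h2 : pre.length - flag = (pre.drop flag).length := by simp
        rw [h1, h2, Nat.add_comm, List.take_append]
        simp
      rw [hbuf]
      have hs : sepB c = false := by rw [← sep_eq]; simpa using hsep
      simp [splitTok, hs, filt]

lemma numword_foldl (w : List Char) : ∀ (b : Bool),
    w.foldl (fun flag c => if !(is_number_char c.toNat) then false else flag) b
    = (b && w.all (fun c => is_number_char c.toNat)) := by
  induction w with
  | nil => simp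
  | cons c w ih =>
    intro b
    simp only [List.foldl_cons, List.all_cons, ih]
    cases h : is_number_char c.toNat <;> cases b <;> simp [h]

lemma digit_eq (c : Char) : is_number_char c.toNat = isDigitB c := by
  simp only [is_number_char, isDigitB, Char.le_def, Char.toNat]
  rw [decide_eq_decide]
  constructor
  · rintro ⟨h1, h2⟩
    exact ⟨by simpa [UInt32.le_iff_toNat_le] using h1, by simpa [UInt32.le_iff_toNat_le] using h2⟩
  · rintro ⟨h1, h2⟩
    exact ⟨by simpa [UInt32.le_iff_toNat_le] using h1, by simpa [UInt32.le_iff_toNat_le] using h2⟩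

lemma numword_eq (w : List Char) : is_number_word w = w.all isDigitB := by
  rw [is_number_word, numword_foldl, Bool.true_and]
  have : (fun c => is_number_char c.toNat) = isDigitB := funext digit_eq
  rw [this]

lemma strip_eq (w : List Char) : number_remove w = stripEdgeDigit w := by
  rw [number_remove, stripEdgeDigit, numword_eq]
  cases hall : w.all isDigitB <;>
    simp [digit_eq, PySem.List.slice_zero_start]

lemma range_set_eq (f : List Char → List Char) :
    ∀ (k : Nat) (t : List (List Char)), k ≤ t.length →
    (PySem.List.pyRange 0 (k : Int) 1).foldl
      (fun t j => PySem.List.pySetD t j (f (PySem.List.pyGetD t j []))) t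
    = (t.take k).map f ++ t.drop k := by
  intro k
  induction k with
  | zero => intro t _; simp [PySem.List.pyRange_one_eq_nil]
  | succ k ih =>
    intro t hk
    have h0 : ((k : Int) + 1) = ((k + 1 : Nat) : Int) := by push_cast; ring
    rw [← h0, PySem.List.pyRange_one_succ_right (by positivity), List.foldl_append]
    rw [ih t (by omega)]
    simp only [List.foldl_cons, List.foldl_nil]
    have hklt : k < t.length := by omega
    have hlen : ((t.take k).map f).length = k := by simp [Nat.min_eq_left (le_of_lt hklt)]
    have hdrop : t.drop k = t[k] :: t.drop (k + 1) := List.drop_eq_getElem_cons hklt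
    have hget : PySem.List.pyGetD ((t.take k).map f ++ t.drop k) (k : Int) [] = t[k] := by
      rw [PySem.List.pyGetD_natCast, hdrop]
      rw [List.getD_eq_getElem?_getD]
      rw [List.getElem?_append_right (by omega)]
      simp [Nat.min_eq_left (le_of_lt hklt), List.getElem?_eq_getElem hklt]
    rw [hget, PySem.List.pySetD_natCast, hdrop]
    have hset : (((t.take k).map f ++ t[k] :: t.drop (k + 1)).set k (f t[k]))
        = (t.take k).map f ++ f t[k] :: t.drop (k + 1) := by
      rw [List.set_append, hlen, if_neg (lt_irrefl k), Nat.sub_self, List.set_cons_zero]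
    rw [hset, List.take_succ_eq_append_getElem hklt, List.map_append]
    simp

lemma enum_fold_aux (f : List Char → List Char) (bound : Int) :
    ∀ (l : List (List Char)) (s : Int) (out : List (List Char)),
    s + l.length ≤ bound →
    (PySem.List.enumerate l s).foldl
      (fun out p =>
        if (if p.1 < bound then f p.2 else p.2) ≠ [] then
          out ++ [if p.1 < bound then f p.2 else p.2] else out) out
    = out ++ (l.map f).filter (fun w => decide (w ≠ [])) := by
  intro l
  induction l with
  | nil => intro s out _; simp
  | cons w l ih =>
    intro s out h
    rw [PySem.List.enumerate_cons]
    simp only [List.foldl_cons, List.length_cons] at *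
    have hs : s < bound := by
      have hl : (0:Int) ≤ (l.length : Int) := by positivity
      push_cast at h
      omega
    rw [ih (s+1) _ (by omega)]
    by_cases hw : f w = [] <;> simp [hw, hs]

lemma enum_fold_eq (f : List Char → List Char) (t : List (List Char)) :
    (PySem.List.enumerate t 0).foldl
      (fun out p =>
        if (if p.1 < (t.length : Int) - 1 then f p.2 else p.2) ≠ [] then
          out ++ [if p.1 < (t.length : Int) - 1 then f p.2 else p.2] else out) []
    = ((t.take (t.length - 1)).map f ++ t.drop (t.length - 1)).filter (fun w => decide (w ≠ [])) := by
  by_cases ht : t = []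
  · subst ht; simp
  · obtain ⟨init, lastw, rfl⟩ : ∃ init lastw, t = init ++ [lastw] :=
      ⟨t.dropLast, t.getLast ht, by rw [List.dropLast_append_getLast ht]⟩
    rw [PySem.List.enumerate_append, List.foldl_append]
    rw [enum_fold_aux f _ init 0 [] (by simp)]
    rw [PySem.List.enumerate_cons, PySem.List.enumerate_nil]
    have htake : (init ++ [lastw]).take ((init ++ [lastw]).length - 1) = init := by
      simp
    have hdrop : (init ++ [lastw]).drop ((init ++ [lastw]).length - 1) = [lastw] := by
      simp
    rw [htake, hdrop, List.filter_append]
    by_cases hlw : lastw = [] <;> simp [hlw]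

-- ===== VERDICT (by name: the statement is the Claim_ definition above) =====
theorem toke_acentos_numeros_spec : Claim_equal_toke_acentos_numeros := by
  intro document _
  unfold Spec_toke_acentos_numeros toke_acentos_numeros toke_acentos_numeros_alt
  have hA := a_fold_eq document.toList document.toList [] [] 0 rfl (by simp) rfl
  simp only [List.nil_append, List.length_nil, Nat.sub_zero, List.drop_zero, List.take_zero,
    filt, List.filterMap_nil] at hA
  have hB := b_fold_eq document.toList [] []
  simp only [List.nil_append, flushB] at hB
  simp only []
  rw [hA, hB]
  set t := splitTok document.toList [] with ht
  rcases Nat.eq_zero_or_pos t.length with h0 | hpos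
  · have htnil : t = [] := List.eq_nil_of_length_eq_zero h0
    rw [htnil]
    simp [PySem.List.pyRange_one_eq_nil, PySem.List.enumerate_nil]
  · rw [enum_fold_eq stripEdgeDigit t]
    have hcast : ((t.length : Int) - 1) = ((t.length - 1 : Nat) : Int) := by omega
    rw [hcast, range_set_eq number_remove (t.length - 1) t (by omega)]
    have hnr : number_remove = stripEdgeDigit := funext strip_eq
    rw [hnr]
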